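-- pv_equiv track=rewrite | github.com/Jay-kaiasoft/signatureScraper | signature_extractor.py | _prefer_website
-- ===== SOURCE A (Python) =====
-- from typing import List, Optional, Tuple, Iterable
--
-- def _prefer_website(candidates: List[str], sender_domain: Optional[str]) -> Optional[str]:
--     """
--     Choose the best website:
--     - prefer sender_domain
--     - else the most concise (shortest) registered domain
--     """
--     if not candidates:
--         return None
--     norm = [c.lower() for c in candidates]
--     if sender_domain and sender_domain.lower() in norm:
--         return sender_domain.lower()
--     norm = sorted(set(norm), key=lambda x: (len(x), x))
--     return norm[0] if norm else None
-- ===== SOURCE B (Python) =====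
-- from typing import List, Optional
--
-- def _prefer_website(candidates: List[str], sender_domain: Optional[str]) -> Optional[str]:
--     """One pass, no set/sort: return the lowercased sender domain at its first
--     occurrence, else the running (len, lex) minimum of the lowercased candidates."""
--     if not candidates:
--         return None
--     target = sender_domain.lower() if sender_domain else None
--     best = None
--     for c in candidates:
--         low = c.lower()
--         if low == target:
--             return target
--         if best is None or (len(low), low) < (len(best), best):
--             best = low
--     return best
-- ===== Notes on version B (the rewrite author's own statement) =====
-- stated objective: faster
-- what changed: A lowercases everything, builds a set, fully sorts it by (len, lex) and takes the first element; B makes a single early-returning pass over the candidates that returns the lowercased sender domain at its first occurrence and otherwise tracks the running (len, lex) minimum, with no set and no sort.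
import Mathlib
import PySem

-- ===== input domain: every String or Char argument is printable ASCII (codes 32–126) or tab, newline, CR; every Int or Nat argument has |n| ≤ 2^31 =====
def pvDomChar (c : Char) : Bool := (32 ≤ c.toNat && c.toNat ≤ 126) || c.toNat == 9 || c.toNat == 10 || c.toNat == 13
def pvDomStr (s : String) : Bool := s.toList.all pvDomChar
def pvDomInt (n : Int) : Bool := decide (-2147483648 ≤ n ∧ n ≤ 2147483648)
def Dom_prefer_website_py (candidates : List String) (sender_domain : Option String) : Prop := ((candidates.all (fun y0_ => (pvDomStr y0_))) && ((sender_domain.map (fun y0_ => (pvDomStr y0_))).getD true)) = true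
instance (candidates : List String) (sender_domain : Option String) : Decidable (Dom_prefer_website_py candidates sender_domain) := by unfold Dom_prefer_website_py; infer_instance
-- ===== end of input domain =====

-- B replaces A's dedup-set + full (len, lex) sort + take-first by a single early-returning
-- pass tracking the running (len, lex) minimum (objective: faster — no sort, no set).

-- ===== PORT A =====
def prefer_website_py (candidates : List String) (sender_domain : Option String) : Option String :=
  if candidates = [] then none
  else
    let norm := candidates.map PySem.Str.lower
    let senderHit : Bool :=
      match sender_domain with
      | none => false
      | some s => decide (s ≠ "") && decide (PySem.Str.lower s ∈ norm)
    if senderHit then sender_domain.map PySem.Str.lower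
    else
      let norm2 := PySem.List.sorted2 (PySem.Set.ofList norm)
        (fun x => PySem.Str.len x) (fun x => x) false
      match norm2 with
      | [] => none
      | x :: _ => some x

-- ===== PORT B =====
-- the for-loop of Source B: early return on the sender target, else keep the (len, lex) minimum
def pvLowLoop (target : Option String) : Option String → List String → Option String
  | best, [] => best
  | best, c :: rest =>
    let low := PySem.Str.lower c
    if target = some low then target
    else
      match best with
      | none => pvLowLoop target (some low) rest
      | some b =>
        if PySem.Str.len low < PySem.Str.len b ∨ (PySem.Str.len low = PySem.Str.len b ∧ low < b)
        then pvLowLoop target (some low) rest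
        else pvLowLoop target (some b) rest

def prefer_website_py_alt (candidates : List String) (sender_domain : Option String) : Option String :=
  if candidates = [] then none
  else
    let target : Option String :=
      match sender_domain with
      | none => none
      | some s => if s = "" then none else some (PySem.Str.lower s)
    pvLowLoop target none candidates

-- ===== PRECONDITION & SPEC =====
def Spec_prefer_website_py (candidates : List String) (sender_domain : Option String) (out : Option String) : Prop := out = prefer_website_py_alt candidates sender_domain
instance (candidates : List String) (sender_domain : Option String) (out : Option String) : Decidable (Spec_prefer_website_py candidates sender_domain out) := by unfold Spec_prefer_website_py; infer_instance

-- ===== CLAIM (what is proved, stated in full; the proofs are below) =====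
def Claim_equal_prefer_website_py : Prop := ∀ (candidates : List String) (sender_domain : Option String), Dom_prefer_website_py candidates sender_domain → Spec_prefer_website_py candidates sender_domain (prefer_website_py candidates sender_domain)

-- ===== LEMMAS AND PROOFS =====

-- the strict (len, lex) order both programs use; literally sorted2's internal comparison
def pvLt (a b : String) : Bool :=
  decide (PySem.Str.len a < PySem.Str.len b) ||
    (!decide (PySem.Str.len b < PySem.Str.len a) && decide (a < b))

theorem pv_bool_false {b : Bool} (h : b = true → False) : b = false := by
  cases b
  · rfl
  · exact absurd rfl h

theorem pvLt_iff (a b : String) :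
    pvLt a b = true ↔
      (PySem.Str.len a < PySem.Str.len b ∨ (PySem.Str.len a = PySem.Str.len b ∧ a < b)) := by
  simp only [pvLt, Bool.or_eq_true, Bool.and_eq_true, Bool.not_eq_true', decide_eq_true_eq,
    decide_eq_false_iff_not]
  constructor
  · rintro (h | ⟨h1, h2⟩)
    · exact Or.inl h
    · by_cases hlt : PySem.Str.len a < PySem.Str.len b
      · exact Or.inl hlt
      · exact Or.inr ⟨by omega, h2⟩
  · rintro (h | ⟨h1, h2⟩)
    · exact Or.inl h
    · exact Or.inr ⟨by omega, h2⟩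

theorem pvLt_irrefl (a : String) : pvLt a a = false := by
  apply pv_bool_false
  rw [pvLt_iff]
  rintro (h | ⟨_, h⟩) <;> exact absurd h (lt_irrefl _)

theorem pvLt_trans {a b c : String} (h1 : pvLt a b = true) (h2 : pvLt b c = true) :
    pvLt a c = true := by
  rw [pvLt_iff] at h1 h2 ⊢
  rcases h1 with h1 | ⟨h1, h1'⟩ <;> rcases h2 with h2 | ⟨h2, h2'⟩
  · exact Or.inl (by omega)
  · exact Or.inl (by omega)
  · exact Or.inl (by omega)
  · exact Or.inr ⟨by omega, lt_trans h1' h2'⟩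

-- b ≤ a (in the (len, lex) order) and a < c imply b < c
theorem pvLt_trans' {a b c : String} (h1 : pvLt a b = false) (h2 : pvLt a c = true) :
    pvLt b c = true := by
  rw [← Bool.not_eq_true, pvLt_iff] at h1
  rw [pvLt_iff] at h2 ⊢
  push Not at h1
  obtain ⟨h1a, h1b⟩ := h1
  rcases h2 with h2 | ⟨h2, h2'⟩
  · exact Or.inl (by omega)
  · by_cases hab : PySem.Str.len b < PySem.Str.len a
    · exact Or.inl (by omega)
    · have heq : PySem.Str.len a = PySem.Str.len b := by omega
      have hba : ¬ a < b := h1b heq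
      exact Or.inr ⟨by omega, lt_of_le_of_lt (le_of_not_gt hba) h2'⟩

theorem pvLt_connect {a b : String} (h1 : pvLt a b = false) (h2 : pvLt b a = false) : a = b := by
  rw [← Bool.not_eq_true, pvLt_iff] at h1 h2
  push Not at h1 h2
  obtain ⟨h1a, h1b⟩ := h1
  obtain ⟨h2a, h2b⟩ := h2
  have heq : PySem.Str.len a = PySem.Str.len b := by omega
  exact le_antisymm (le_of_not_gt (h2b heq.symm)) (le_of_not_gt (h1b heq))

-- minimality of the head survives one insertBy pvLt step
theorem insertBy_min (x : String) (acc : List String)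
    (hacc : ∀ m t, acc = m :: t → ∀ y ∈ acc, pvLt y m = false) :
    ∀ m t, PySem.List.insertBy pvLt x acc = m :: t →
      ∀ y ∈ PySem.List.insertBy pvLt x acc, pvLt y m = false := by
  intro m t h y hy
  match acc, hacc with
  | [], _ =>
    have h1 : PySem.List.insertBy pvLt x ([] : List String) = [x] := rfl
    rw [h1] at h hy
    injection h with hm _
    simp only [List.mem_singleton] at hy
    subst hm; subst hy
    exact pvLt_irrefl _
  | z :: zs, hacc =>
    have h1 : PySem.List.insertBy pvLt x (z :: zs)
        = if pvLt x z = true then x :: z :: zs else z :: PySem.List.insertBy pvLt x zs := rfl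
    rw [h1] at h hy
    by_cases hxz : pvLt x z = true
    · rw [if_pos hxz] at h hy
      injection h with hm _
      subst hm
      rcases List.mem_cons.mp hy with rfl | hy'
      · exact pvLt_irrefl _
      · rcases List.mem_cons.mp hy' with rfl | hy''
        · apply pv_bool_false; intro hzx
          have := pvLt_trans hzx hxz
          rw [pvLt_irrefl] at this; exact Bool.false_ne_true this
        · apply pv_bool_false; intro hyx
          have hyz : pvLt y z = false := hacc z zs rfl y (List.mem_cons_of_mem _ hy'')
          have := pvLt_trans hyx hxz
          rw [hyz] at this; exact Bool.false_ne_true this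
    · rw [if_neg hxz] at h hy
      injection h with hm _
      subst hm
      rcases List.mem_cons.mp hy with rfl | hy'
      · exact pvLt_irrefl _
      · rcases (PySem.List.mem_insertBy pvLt x y zs).mp hy' with rfl | hy''
        · exact pv_bool_false fun hx => hxz hx
        · exact hacc z zs rfl y (List.mem_cons_of_mem _ hy'')

-- the head of the insertion-sort fold is minimal for pvLt
theorem foldl_insertBy_min (xs : List String) :
    ∀ acc, (∀ m t, acc = m :: t → ∀ y ∈ acc, pvLt y m = false) →
      ∀ m t, xs.foldl (fun acc x => PySem.List.insertBy pvLt x acc) acc = m :: t →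
        ∀ y ∈ xs.foldl (fun acc x => PySem.List.insertBy pvLt x acc) acc, pvLt y m = false := by
  induction xs with
  | nil => intro acc hacc m t h y hy; exact hacc m t h y hy
  | cons x xs ih =>
    intro acc hacc m t h y hy
    exact ih (PySem.List.insertBy pvLt x acc) (insertBy_min x acc hacc) m t h y hy

theorem sorted2_head_min (xs : List String) (m : String) (t : List String)
    (h : PySem.List.sorted2 xs (fun x => PySem.Str.len x) (fun x => x) false = m :: t) :
    m ∈ xs ∧ ∀ y ∈ xs, pvLt y m = false := by
  have heq : PySem.List.sorted2 xs (fun x => PySem.Str.len x) (fun x => x) false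
      = xs.foldl (fun acc x => PySem.List.insertBy pvLt x acc) [] := rfl
  have hperm := PySem.List.sorted2_perm xs (fun x => PySem.Str.len x) (fun x => x) false
  constructor
  · exact hperm.mem_iff.mp (h ▸ List.mem_cons_self)
  · intro y hy
    have hy' : y ∈ PySem.List.sorted2 xs (fun x => PySem.Str.len x) (fun x => x) false :=
      hperm.mem_iff.mpr hy
    rw [heq] at h hy'
    exact foldl_insertBy_min xs [] (by intro m t h; simp at h) m t h y hy'

-- B's loop returns the target as soon as it occurs among the lowercased candidates
theorem pvLowLoop_hit (t : String) (l : List String) :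
    ∀ best, t ∈ l.map PySem.Str.lower → pvLowLoop (some t) best l = some t := by
  induction l with
  | nil => intro best h; simp at h
  | cons c rest ih =>
    intro best h
    by_cases hc : t = PySem.Str.lower c
    · simp only [pvLowLoop]
      rw [if_pos (by rw [hc])]
    · have h' : t ∈ rest.map PySem.Str.lower := by
        rcases List.mem_cons.mp (List.map_cons .. ▸ h) with h0 | h0
        · exact absurd h0 hc
        · exact h0
      simp only [pvLowLoop]
      by_cases hif : (some t : Option String) = some (PySem.Str.lower c)
      · rw [if_pos hif]
      · rw [if_neg hif]
        cases best with
        | none => exact ih _ h'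
        | some b =>
          dsimp only
          by_cases hP : PySem.Str.len (PySem.Str.lower c) < PySem.Str.len b ∨
              (PySem.Str.len (PySem.Str.lower c) = PySem.Str.len b ∧ PySem.Str.lower c < b)
          · rw [if_pos hP]; exact ih _ h'
          · rw [if_neg hP]; exact ih _ h'

-- when the target never matches, B's loop computes the (len, lex) minimum
theorem pvLowLoop_min (target : Option String) (l : List String) :
    ∀ b, (∀ c ∈ l, target ≠ some (PySem.Str.lower c)) →
      ∃ r, pvLowLoop target (some b) l = some r ∧ r ∈ b :: l.map PySem.Str.lower ∧
        ∀ y ∈ b :: l.map PySem.Str.lower, pvLt y r = false := by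
  induction l with
  | nil =>
    intro b _
    refine ⟨b, rfl, List.mem_cons_self, ?_⟩
    intro y hy
    simp only [List.map_nil, List.mem_singleton] at hy
    subst hy; exact pvLt_irrefl _
  | cons c rest ih =>
    intro b hmiss
    have hne : target ≠ some (PySem.Str.lower c) := hmiss c List.mem_cons_self
    have hmiss' : ∀ c' ∈ rest, target ≠ some (PySem.Str.lower c') :=
      fun c' hc' => hmiss c' (List.mem_cons_of_mem _ hc')
    simp only [pvLowLoop]
    rw [if_neg hne]
    by_cases hP : PySem.Str.len (PySem.Str.lower c) < PySem.Str.len b ∨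
        (PySem.Str.len (PySem.Str.lower c) = PySem.Str.len b ∧ PySem.Str.lower c < b)
    · rw [if_pos hP]
      obtain ⟨r, hr, hrmem, hrmin⟩ := ih (PySem.Str.lower c) hmiss'
      have hlowb : pvLt (PySem.Str.lower c) b = true := (pvLt_iff _ _).mpr hP
      refine ⟨r, hr, ?_, ?_⟩
      · simpa using Or.inr (by simpa using hrmem)
      · intro y hy
        rcases List.mem_cons.mp hy with rfl | hy'
        · apply pv_bool_false; intro hbr
          have := pvLt_trans hlowb hbr
          have hlr : pvLt (PySem.Str.lower c) r = false := hrmin _ List.mem_cons_self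
          rw [hlr] at this; exact Bool.false_ne_true this
        · exact hrmin y (by simpa using hy')
    · rw [if_neg hP]
      obtain ⟨r, hr, hrmem, hrmin⟩ := ih b hmiss'
      have hlowb : pvLt (PySem.Str.lower c) b = false :=
        pv_bool_false fun hx => hP ((pvLt_iff _ _).mp hx)
      refine ⟨r, hr, ?_, ?_⟩
      · rcases List.mem_cons.mp hrmem with rfl | hy'
        · exact List.mem_cons_self
        · simp only [List.map_cons, List.mem_cons]
          rcases List.mem_map.mp hy' with ⟨c', hc', rfl⟩
          exact Or.inr (Or.inr (List.mem_map_of_mem hc'))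
      · intro y hy
        simp only [List.map_cons, List.mem_cons] at hy
        rcases hy with rfl | rfl | hy'
        · exact hrmin y List.mem_cons_self
        · apply pv_bool_false; intro hlow_r
          have := pvLt_trans' hlowb hlow_r
          have hbr : pvLt b r = false := hrmin _ List.mem_cons_self
          rw [hbr] at this; exact Bool.false_ne_true this
        · exact hrmin y (List.mem_cons_of_mem _ hy')

-- the fallback branch: head of sorted deduped list = loop minimum
theorem pv_min_case (candidates : List String) (target : Option String)
    (hne : candidates ≠ [])
    (hmiss : ∀ c ∈ candidates, target ≠ some (PySem.Str.lower c)) :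
    (match PySem.List.sorted2 (PySem.Set.ofList (candidates.map PySem.Str.lower))
        (fun x => PySem.Str.len x) (fun x => x) false with
      | [] => none
      | x :: _ => some x) = pvLowLoop target none candidates := by
  obtain ⟨c, rest, rfl⟩ := List.exists_cons_of_ne_nil hne
  -- right-hand side: first iteration sets best to lower c
  have hrhs : pvLowLoop target none (c :: rest)
      = pvLowLoop target (some (PySem.Str.lower c)) rest := by
    simp only [pvLowLoop]
    rw [if_neg (hmiss c List.mem_cons_self)]
  obtain ⟨r, hr, hrmem, hrmin⟩ :=
    pvLowLoop_min target rest (PySem.Str.lower c)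
      (fun c' hc' => hmiss c' (List.mem_cons_of_mem _ hc'))
  -- left-hand side
  have hlowmem : PySem.Str.lower c ∈ PySem.Set.ofList ((c :: rest).map PySem.Str.lower) :=
    (PySem.Set.mem_ofList _ _).mpr (by simp)
  cases hs : PySem.List.sorted2 (PySem.Set.ofList ((c :: rest).map PySem.Str.lower))
      (fun x => PySem.Str.len x) (fun x => x) false with
  | nil =>
    exfalso
    have hperm := PySem.List.sorted2_perm (PySem.Set.ofList ((c :: rest).map PySem.Str.lower))
      (fun x => PySem.Str.len x) (fun x => x) false
    rw [hs] at hperm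
    exact absurd (hperm.mem_iff.mpr hlowmem) (List.not_mem_nil)
  | cons m t =>
    obtain ⟨hmmem, hmin⟩ := sorted2_head_min _ m t hs
    -- both m and r are members of the lowered list, each minimal; hence equal
    have hmmem' : m ∈ (c :: rest).map PySem.Str.lower := (PySem.Set.mem_ofList _ _).mp hmmem
    have hrmem' : r ∈ PySem.Set.ofList ((c :: rest).map PySem.Str.lower) :=
      (PySem.Set.mem_ofList _ _).mpr (by simpa using hrmem)
    have h1 : pvLt m r = false := hrmin m (by simpa using hmmem')
    have h2 : pvLt r m = false := hmin r hrmem'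
    rw [hrhs, hr, pvLt_connect h1 h2]

-- ===== VERDICT (by name: the statement is the Claim_ definition above) =====
theorem prefer_website_py_spec : Claim_equal_prefer_website_py := by
  intro candidates sender_domain _
  unfold Spec_prefer_website_py prefer_website_py prefer_website_py_alt
  by_cases hc : candidates = []
  · rw [if_pos hc, if_pos hc]
  · rw [if_neg hc, if_neg hc]
    cases sender_domain with
    | none =>
      dsimp only
      rw [if_neg Bool.false_ne_true]
      exact pv_min_case candidates none hc (fun c _ h => nomatch h)
    | some s =>
      dsimp only
      by_cases hs0 : s = ""
      · rw [if_neg (by simp [hs0]), if_pos hs0]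
        exact pv_min_case candidates none hc (fun c _ h => nomatch h)
      · rw [if_neg hs0]
        by_cases hin : PySem.Str.lower s ∈ candidates.map PySem.Str.lower
        · rw [if_pos (by simp [hs0, hin])]
          exact (pvLowLoop_hit (PySem.Str.lower s) candidates none hin).symm
        · rw [if_neg (by simp [hs0, hin])]
          apply pv_min_case candidates (some (PySem.Str.lower s)) hc
          intro c hcmem h
          injection h with h'
          exact hin (h' ▸ List.mem_map_of_mem hcmem)
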